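-- pv_equiv track=rewrite | github.com/TianLuan93/modal-sat-prover | modalClauses.py | calDepth
-- ===== SOURCE A (Python) =====
-- def calDepth(clause):
--     box_depth = 0
--     for arg in clause[::-1]:
--         if arg != "[]":
--             return box_depth
--         else:
--             box_depth = box_depth + 1
--     return box_depth
-- ===== SOURCE B (Python) =====
-- def calDepth(clause):
--     box_depth = 0
--     for arg in clause:
--         if arg == "[]":
--             box_depth += 1
--         else:
--             box_depth = 0
--     return box_depth
-- ===== Notes on version B (the rewrite author's own statement) =====
-- stated objective: simpler
-- what changed: B does a single forward pass with a reset-on-mismatch counter instead of reversing the list and returning early on the first non-'[]' element.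
import Mathlib
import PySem

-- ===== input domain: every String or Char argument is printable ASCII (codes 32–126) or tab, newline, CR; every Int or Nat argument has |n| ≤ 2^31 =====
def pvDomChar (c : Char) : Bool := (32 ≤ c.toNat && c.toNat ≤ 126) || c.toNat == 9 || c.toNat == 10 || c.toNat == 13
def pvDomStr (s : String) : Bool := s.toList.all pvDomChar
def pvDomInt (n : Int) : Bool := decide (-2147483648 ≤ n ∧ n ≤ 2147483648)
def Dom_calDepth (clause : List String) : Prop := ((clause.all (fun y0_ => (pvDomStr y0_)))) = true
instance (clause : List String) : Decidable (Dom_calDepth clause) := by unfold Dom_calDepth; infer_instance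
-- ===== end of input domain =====

-- B changes the decomposition: one forward pass with a reset-on-mismatch counter
-- instead of A's reversed scan with an early return. Same O(n) cost.

-- ===== PORT A =====
-- the for-loop over clause[::-1] with an early return, as structural recursion;
-- clause[::-1] is exactly List.reverse
def calDepthGoA (args : List String) (box_depth : Int) : Int :=
  match args with
  | [] => box_depth
  | arg :: rest => if arg ≠ "[]" then box_depth else calDepthGoA rest (box_depth + 1)

def calDepth (clause : List String) : Int := calDepthGoA clause.reverse 0

-- ===== PORT B =====
def calDepth_alt (clause : List String) : Int :=
  clause.foldl (fun box_depth arg => if arg == "[]" then box_depth + 1 else 0) 0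

-- ===== PRECONDITION & SPEC =====
def Spec_calDepth (clause : List String) (out : Int) : Prop := out = calDepth_alt clause
instance (clause : List String) (out : Int) : Decidable (Spec_calDepth clause out) := by unfold Spec_calDepth; infer_instance

-- ===== CLAIM (what is proved, stated in full; the proofs are below) =====
def Claim_equal_calDepth : Prop := ∀ (clause : List String), Dom_calDepth clause → Spec_calDepth clause (calDepth clause)

-- ===== LEMMAS AND PROOFS =====

theorem calDepthGoA_shift (l : List String) (d : Int) :
    calDepthGoA l d = d + calDepthGoA l 0 := by
  induction l generalizing d with
  | nil => simp [calDepthGoA]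
  | cons x xs ih =>
    by_cases h : x = "[]"
    · simp [calDepthGoA, h]
      rw [ih (d + 1), ih 1]
      ring
    · simp [calDepthGoA, h]

theorem calDepth_eq_alt (l : List String) :
    calDepthGoA l.reverse 0 = calDepth_alt l := by
  induction l using List.reverseRecOn with
  | nil => simp [calDepthGoA, calDepth_alt]
  | append_singleton xs x ih =>
    unfold calDepth_alt at *
    rw [List.reverse_append, List.foldl_append]
    simp only [List.reverse_singleton, List.singleton_append, List.foldl_cons, List.foldl_nil]
    by_cases h : x = "[]"
    · simp only [calDepthGoA, h, ne_eq, not_true_eq_false, if_false, beq_self_eq_true, if_true]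
      rw [calDepthGoA_shift, ih]
      omega
    · simp [calDepthGoA, h]

-- ===== VERDICT (by name: the statement is the Claim_ definition above) =====
theorem calDepth_spec : Claim_equal_calDepth := by
  intro clause _
  unfold Spec_calDepth calDepth
  exact calDepth_eq_alt clause
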